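-- pv_equiv track=rewrite | github.com/narennravi/Guvi-Codekata-ARRAYS | 298.py | find_bride
-- ===== SOURCE A (Python) =====
-- def is_valid_cell(row, col, n, m):
--     return row >= 0 and row < n and col >= 0 and col < m
--
-- def find_bride(matrix, n, m):
--     max_qualities = 0
--     bride_row, bride_col = -1, -1
--
--     for row in range(n):
--         for col in range(m):
--             if row == 0 and col == 0:
--                 continue  # Skip Rohit's house
--
--             if matrix[row][col] == 1:  # Potential bride
--                 qualities = 0
--
--                 # Check neighbors in the 8-way direction
--                 for dr in [-1, 0, 1]:
--                     for dc in [-1, 0, 1]: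
--                         if dr == 0 and dc == 0:
--                             continue  # Skip the current cell
--
--                         if is_valid_cell(row+dr, col+dc, n, m) and matrix[row+dr][col+dc] == 1:
--                             qualities += 1
--
--                 if qualities > max_qualities:
--                     max_qualities = qualities
--                     bride_row, bride_col = row+1, col+1
--
--     if bride_row != -1 and bride_col != -1:
--         return f"{bride_row}:{bride_col}:{max_qualities}"
--     else:
--         return "No suitable girl found"
-- ===== SOURCE B (Python) =====
-- def in_bounds(r, c, n, m):
--     return 0 <= r and r < n and 0 <= c and c < m
--
-- def find_bride(matrix, n, m):
--     # First pass: every 1-cell distributes one point to each in-bounds 8-neighbor.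
--     counts = {}
--     for r in range(n):
--         for c in range(m):
--             if matrix[r][c] == 1:
--                 for dr in (-1, 0, 1):
--                     for dc in (-1, 0, 1):
--                         if dr == 0 and dc == 0:
--                             continue
--                         if in_bounds(r + dr, c + dc, n, m):
--                             key = (r + dr, c + dc)
--                             counts[key] = counts.get(key, 0) + 1
--     # Second pass: first 1-cell (row-major, skipping (0,0)) strictly beating the running max wins.
--     best = "No suitable girl found"
--     max_qualities = 0
--     for r in range(n):
--         for c in range(m):
--             if not (r == 0 and c == 0) and matrix[r][c] == 1:
--                 q = counts.get((r, c), 0)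
--                 if q > max_qualities:
--                     max_qualities = q
--                     best = f"{r + 1}:{c + 1}:{q}"
--     return best
-- ===== Notes on version B (the rewrite author's own statement) =====
-- stated objective: alternative
-- what changed: B replaces A's per-candidate gathering of the 8-neighbor count by a first distribution pass that builds a count table (each 1-cell adds 1 to every in-bounds neighbor's counter), then a second row-major scan picks the first 1-cell (skipping (0,0)) strictly beating the running max and formats it on the spot.
-- outside the precondition, e.g. on find_bride([[]], 1, 1): A returns 'No suitable girl found', B raises IndexError
import Mathlib
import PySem

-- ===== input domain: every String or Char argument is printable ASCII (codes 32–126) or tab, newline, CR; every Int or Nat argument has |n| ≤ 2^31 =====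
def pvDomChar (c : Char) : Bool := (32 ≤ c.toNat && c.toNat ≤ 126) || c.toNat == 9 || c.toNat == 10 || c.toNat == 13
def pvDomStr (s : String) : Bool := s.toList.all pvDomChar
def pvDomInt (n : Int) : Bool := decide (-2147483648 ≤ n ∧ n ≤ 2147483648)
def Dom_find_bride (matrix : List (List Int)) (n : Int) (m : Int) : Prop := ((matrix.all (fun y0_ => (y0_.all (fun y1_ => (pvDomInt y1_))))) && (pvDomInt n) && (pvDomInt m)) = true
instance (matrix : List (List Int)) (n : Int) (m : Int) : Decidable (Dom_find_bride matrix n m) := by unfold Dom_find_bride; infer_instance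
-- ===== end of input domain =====

-- B replaces A's per-candidate gathering of 8-neighbor counts by a distribution pass building a
-- count table, then a scan picking the first strict improver; same cost, alternative algorithm.

-- ===== PORT A =====
-- shared indexing helper: matrix[r][c] (both Pythons index the same way; in-bounds under Pre_)
def pvCell (matrix : List (List Int)) (r c : Int) : Int :=
  PySem.List.pyGetD (PySem.List.pyGetD matrix r []) c 0

def is_valid_cell (row col n m : Int) : Bool :=
  decide (0 ≤ row) && decide (row < n) && decide (0 ≤ col) && decide (col < m)

def find_bride (matrix : List (List Int)) (n : Int) (m : Int) : String :=
  let st := (PySem.List.pyRange 0 n 1).foldl (fun st row =>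
    (PySem.List.pyRange 0 m 1).foldl (fun st col =>
      if row = 0 ∧ col = 0 then st      -- Skip Rohit's house
      else if pvCell matrix row col = 1 then  -- Potential bride
        let q := ([(-1 : Int), 0, 1]).foldl (fun q dr =>
          ([(-1 : Int), 0, 1]).foldl (fun q dc =>
            if dr = 0 ∧ dc = 0 then q   -- Skip the current cell
            else if is_valid_cell (row + dr) (col + dc) n m = true ∧
                    pvCell matrix (row + dr) (col + dc) = 1 then q + 1 else q) q) (0 : Int)
        if q > st.1 then (q, row + 1, col + 1) else st
      else st) st) ((0 : Int), (-1 : Int), (-1 : Int))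
  if st.2.1 ≠ -1 ∧ st.2.2 ≠ -1 then
    PySem.Int.toStr st.2.1 ++ ":" ++ PySem.Int.toStr st.2.2 ++ ":" ++ PySem.Int.toStr st.1
  else "No suitable girl found"

-- ===== PORT B =====
def pvInBounds (r c n m : Int) : Bool :=
  decide (0 ≤ r) && decide (r < n) && decide (0 ≤ c) && decide (c < m)

def pvFmt (r c q : Int) : String :=
  PySem.Int.toStr r ++ ":" ++ PySem.Int.toStr c ++ ":" ++ PySem.Int.toStr q

def find_bride_alt (matrix : List (List Int)) (n : Int) (m : Int) : String :=
  let counts : PySem.Dict (Int × Int) Int :=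
    (PySem.List.pyRange 0 n 1).foldl (fun d r =>
      (PySem.List.pyRange 0 m 1).foldl (fun d c =>
        if pvCell matrix r c = 1 then
          ([(-1 : Int), 0, 1]).foldl (fun d dr =>
            ([(-1 : Int), 0, 1]).foldl (fun d dc =>
              if dr = 0 ∧ dc = 0 then d
              else if pvInBounds (r + dr) (c + dc) n m = true then
                d.insert (r + dr, c + dc) (d.getD (r + dr, c + dc) 0 + 1)
              else d) d) d
        else d) d) PySem.Dict.empty
  let st := (PySem.List.pyRange 0 n 1).foldl (fun st r =>
    (PySem.List.pyRange 0 m 1).foldl (fun st c =>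
      if ¬(r = 0 ∧ c = 0) ∧ pvCell matrix r c = 1 then
        let q := counts.getD (r, c) 0
        if q > st.2 then (pvFmt (r + 1) (c + 1) q, q) else st
      else st) st) ("No suitable girl found", (0 : Int))
  st.1

-- ===== PRECONDITION & SPEC =====
-- Pre_ excludes the inputs whose declared n×m extent overruns the actual matrix shape: there
-- Python A raises IndexError, except in the degenerate case where (0,0) is the only cell (A skips
-- it unread and returns the no-candidate answer) while B's distribution pass reads it and raises.
def Pre_find_bride (matrix : List (List Int)) (n : Int) (m : Int) : Prop :=
  n ≤ 0 ∨ m ≤ 0 ∨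
    (n ≤ (matrix.length : Int) ∧ ∀ row ∈ matrix.take n.toNat, m ≤ (row.length : Int))
instance (matrix : List (List Int)) (n : Int) (m : Int) : Decidable (Pre_find_bride matrix n m) := by
  unfold Pre_find_bride; infer_instance

def pvWitness_find_bride : List (List Int) × Int × Int := ([[1, 1], [1, 0]], 2, 2)

def Spec_find_bride (matrix : List (List Int)) (n : Int) (m : Int) (out : String) : Prop := out = find_bride_alt matrix n m
instance (matrix : List (List Int)) (n : Int) (m : Int) (out : String) : Decidable (Spec_find_bride matrix n m out) := by unfold Spec_find_bride; infer_instance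

-- ===== CLAIM (what is proved, stated in full; the proofs are below) =====
def Claim_equal_find_bride : Prop := ∀ (matrix : List (List Int)) (n : Int) (m : Int), Dom_find_bride matrix n m → Pre_find_bride matrix n m → Spec_find_bride matrix n m (find_bride matrix n m)

-- ===== LEMMAS AND PROOFS =====

-- proof-only helpers
def pvOffs : List Int := [-1, 0, 1]

def pvPairs (l1 l2 : List Int) : List (Int × Int) :=
  l1.flatMap (fun a => l2.map (fun b => (a, b)))

-- the keys B's distribution pass increments, per source cell
def pvNbrKeys (n m r c : Int) : List (Int × Int) :=
  pvOffs.flatMap (fun dr => pvOffs.flatMap (fun dc =>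
    if dr = 0 ∧ dc = 0 then []
    else if pvInBounds (r + dr) (c + dc) n m = true then [(r + dr, c + dc)] else []))

def pvKeyList (matrix : List (List Int)) (n m : Int) : List (Int × Int) :=
  (pvPairs (PySem.List.pyRange 0 n 1) (PySem.List.pyRange 0 m 1)).flatMap
    (fun p => if pvCell matrix p.1 p.2 = 1 then pvNbrKeys n m p.1 p.2 else [])

-- one row of A's gather loop (proof-only view of pvQ's inner fold)
def pvRow (matrix : List (List Int)) (n m r c : Int) (q dr : Int) : Int :=
  ([(-1 : Int), 0, 1]).foldl (fun q dc =>
    if dr = 0 ∧ dc = 0 then q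
    else if is_valid_cell (r + dr) (c + dc) n m = true ∧
            pvCell matrix (r + dr) (c + dc) = 1 then q + 1 else q) q

-- A's gathered quality count, verbatim
def pvQ (matrix : List (List Int)) (n m row col : Int) : Int :=
  ([(-1 : Int), 0, 1]).foldl (fun q dr =>
    ([(-1 : Int), 0, 1]).foldl (fun q dc =>
      if dr = 0 ∧ dc = 0 then q
      else if is_valid_cell (row + dr) (col + dc) n m = true ∧
              pvCell matrix (row + dr) (col + dc) = 1 then q + 1 else q) q) (0 : Int)

-- the simulation map from A's loop state to B's
def pvRender (a : Int × Int × Int) : String × Int :=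
  (if a.2.1 ≠ -1 ∧ a.2.2 ≠ -1 then pvFmt a.2.1 a.2.2 a.1 else "No suitable girl found", a.1)

theorem pv_foldl_flatMap {α β σ : Type} (xs : List α) (g : α → List β) (f : σ → β → σ) (init : σ) :
    (xs.flatMap g).foldl f init = xs.foldl (fun s x => (g x).foldl f s) init := by
  induction xs generalizing init with
  | nil => rfl
  | cons x t ih => simp [List.flatMap_cons, List.foldl_append, ih]

-- nested fold over two ranges = fold over the pair list
theorem pv_foldl_pair {σ : Type} (l1 l2 : List Int) (g : σ → Int → Int → σ) (init : σ) :
    l1.foldl (fun s a => l2.foldl (fun s b => g s a b) s) init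
      = (pvPairs l1 l2).foldl (fun s p => g s p.1 p.2) init := by
  rw [pvPairs, pv_foldl_flatMap]
  simp [List.foldl_map]

-- B's count table is the increment fold over pvKeyList
theorem pv_counts_eq (matrix : List (List Int)) (n m : Int) :
    (PySem.List.pyRange 0 n 1).foldl (fun d r =>
      (PySem.List.pyRange 0 m 1).foldl (fun d c =>
        if pvCell matrix r c = 1 then
          ([(-1 : Int), 0, 1]).foldl (fun d dr =>
            ([(-1 : Int), 0, 1]).foldl (fun d dc =>
              if dr = 0 ∧ dc = 0 then d
              else if pvInBounds (r + dr) (c + dc) n m = true then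
                PySem.Dict.insert d (r + dr, c + dc) (PySem.Dict.getD d (r + dr, c + dc) 0 + 1)
              else d) d) d
        else d) d) (PySem.Dict.empty : PySem.Dict (Int × Int) Int)
    = (pvKeyList matrix n m).foldl
        (fun d k => PySem.Dict.insert d k (PySem.Dict.getD d k 0 + 1))
        (PySem.Dict.empty : PySem.Dict (Int × Int) Int) := by
  rw [pv_foldl_pair, pvKeyList, pv_foldl_flatMap]
  congr 1
  funext d p
  by_cases hv : pvCell matrix p.1 p.2 = 1
  · simp only [hv, if_pos]
    rw [pvNbrKeys, pv_foldl_flatMap]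
    congr 1
    funext d dr
    rw [pv_foldl_flatMap]
    congr 1
    funext d dc
    by_cases h0 : dr = 0 ∧ dc = 0
    · simp [h0]
    · by_cases hb : pvInBounds (p.1 + dr) (p.2 + dc) n m = true
      · simp [h0, hb]
      · simp [h0, hb]
  · simp [hv]

theorem pv_count_flatMap {α β : Type} [BEq β] (xs : List α) (g : α → List β) (v : β) :
    (xs.flatMap g).count v = (xs.map (fun x => (g x).count v)).sum := by
  induction xs with
  | nil => rfl
  | cons x t ih => simp [List.count_append, ih]

theorem pv_sum_point (l : List Int) (a : Int) (f : Int → Nat) (h : l.Nodup) :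
    (l.map (fun i => if i = a then f i else 0)).sum = if a ∈ l then f a else 0 := by
  induction l with
  | nil => simp
  | cons x t ih =>
    simp only [List.nodup_cons] at h
    simp only [List.map_cons, List.sum_cons, ih h.2, List.mem_cons]
    by_cases hx : x = a
    · subst hx; simp [h.1]
    · simp [hx, Ne.symm hx]

theorem pv_sum_swap {α : Type} (l1 : List α) (l2 : List Int) (F : α → Int → Nat) :
    (l1.map (fun p => (l2.map (fun x => F p x)).sum)).sum
      = (l2.map (fun x => (l1.map (fun p => F p x)).sum)).sum := by
  induction l1 with
  | nil => simp
  | cons p t ih => simp [ih, ← List.sum_map_add]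

theorem pv_pairs_sum (l1 l2 : List Int) (F : Int × Int → Nat) :
    ((pvPairs l1 l2).map F).sum = (l1.map (fun a => (l2.map (fun b => F (a, b))).sum)).sum := by
  induction l1 with
  | nil => rfl
  | cons a t ih =>
    simp only [pvPairs, List.flatMap_cons, List.map_append, List.sum_append, List.map_map,
      Function.comp_def, List.map_cons, List.sum_cons] at ih ⊢
    rw [ih]

theorem pv_pairs_point (l1 l2 : List Int) (h1 : l1.Nodup) (h2 : l2.Nodup) (a b : Int) (k : Nat) :
    ((pvPairs l1 l2).map (fun p => if p.1 = a ∧ p.2 = b then k else 0)).sum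
      = if a ∈ l1 ∧ b ∈ l2 then k else 0 := by
  rw [pv_pairs_sum]
  have h3 : ∀ x : Int, (l2.map (fun y => if x = a ∧ y = b then k else 0)).sum
      = if x = a then (if b ∈ l2 then k else 0) else 0 := by
    intro x
    by_cases hx : x = a
    · subst hx
      simp only [true_and]
      exact pv_sum_point l2 b (fun _ => k) h2
    · simp [hx]
  simp only [h3]
  rw [pv_sum_point l1 a (fun _ => if b ∈ l2 then k else 0) h1, ite_and]

-- one-point evaluation of B's scattered term, rephrased as A's gathered term at the opposite offset
def pvT (matrix : List (List Int)) (n m a b : Int) : Nat :=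
  if (((0 ≤ a ∧ a < n) ∧ 0 ≤ b) ∧ b < m) ∧ pvCell matrix a b = 1 then 1 else 0

-- B's scattered contribution from offset (dr, dc) toward the fixed target cell
def pvG (matrix : List (List Int)) (n m r c dr dc : Int) : Nat :=
  if ((r - dr) ∈ PySem.List.pyRange 0 n 1 ∧ (c - dc) ∈ PySem.List.pyRange 0 m 1) then
    (if ¬(dr = 0 ∧ dc = 0) ∧ pvCell matrix (r - dr) (c - dc) = 1 then 1 else 0) else 0

-- scatter = gather: the count table at an in-range cell is A's gathered quality
theorem pv_count_eq_Q (matrix : List (List Int)) (n m r c : Int)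
    (hr : 0 ≤ r ∧ r < n) (hc : 0 ≤ c ∧ c < m) :
    (((pvKeyList matrix n m).count (r, c) : Int)) = pvQ matrix n m r c := by
  obtain ⟨hr0, hrn⟩ := hr
  obtain ⟨hc0, hcm⟩ := hc
  rw [pvKeyList, pv_count_flatMap]
  have hcell : ∀ p : Int × Int,
      ((if pvCell matrix p.1 p.2 = 1 then pvNbrKeys n m p.1 p.2 else []).count ((r, c) : Int × Int))
        = (pvOffs.map (fun dr => (pvOffs.map (fun dc =>
            if (p.1 = r - dr ∧ p.2 = c - dc) ∧
               ¬(dr = 0 ∧ dc = 0) ∧ pvCell matrix (r - dr) (c - dc) = 1 then 1 else 0)).sum)).sum := by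
    intro p
    by_cases hv : pvCell matrix p.1 p.2 = 1
    · rw [if_pos hv, pvNbrKeys, pv_count_flatMap]
      congr 1
      apply List.map_congr_left
      intro dr _
      rw [pv_count_flatMap]
      congr 1
      apply List.map_congr_left
      intro dc _
      by_cases h0 : dr = 0 ∧ dc = 0
      · simp [h0]
      · rw [if_neg h0]
        by_cases hb : pvInBounds (p.1 + dr) (p.2 + dc) n m = true
        · rw [if_pos hb]
          by_cases he : p.1 = r - dr ∧ p.2 = c - dc
          · obtain ⟨e1, e2⟩ := he
            have h1 : p.1 + dr = r := by omega
            have h2 : p.2 + dc = c := by omega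
            have hv' : pvCell matrix (r - dr) (c - dc) = 1 := by rw [← e1, ← e2]; exact hv
            rw [h1, h2, if_pos ⟨⟨e1, e2⟩, h0, hv'⟩]
            simp
          · have hne : ((r, c) : Int × Int) ≠ (p.1 + dr, p.2 + dc) := by
              intro hx
              apply he
              rw [Prod.mk.injEq] at hx
              constructor <;> omega
            rw [if_neg (fun hx => he hx.1)]
            simp only [List.count_singleton]
            simp only [beq_iff_eq, Prod.mk.injEq]
            rw [if_neg (fun hx => he ⟨by omega, by omega⟩)]
        · rw [if_neg hb]
          rw [if_neg (fun hx => by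
            rcases hx with ⟨⟨e1, e2⟩, -⟩
            apply hb
            have h1 : p.1 + dr = r := by omega
            have h2 : p.2 + dc = c := by omega
            rw [h1, h2]
            simp only [pvInBounds, Bool.and_eq_true, decide_eq_true_eq]
            exact ⟨⟨⟨hr0, hrn⟩, hc0⟩, hcm⟩)]
          simp
    · rw [if_neg hv]
      symm
      apply List.sum_eq_zero
      intro x hx
      simp only [List.mem_map] at hx
      obtain ⟨dr, -, rfl⟩ := hx
      apply List.sum_eq_zero
      intro y hy
      simp only [List.mem_map] at hy
      obtain ⟨dc, -, rfl⟩ := hy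
      rw [if_neg]
      rintro ⟨⟨e1, e2⟩, -, hv'⟩
      apply hv
      rw [e1, e2]
      exact hv' 
  simp only [hcell]
  rw [pv_sum_swap]
  have hswap2 : ∀ dr ∈ pvOffs,
      ((pvPairs (PySem.List.pyRange 0 n 1) (PySem.List.pyRange 0 m 1)).map (fun p =>
        (pvOffs.map (fun dc =>
          if (p.1 = r - dr ∧ p.2 = c - dc) ∧
             ¬(dr = 0 ∧ dc = 0) ∧ pvCell matrix (r - dr) (c - dc) = 1 then 1 else 0)).sum)).sum
      = (pvOffs.map (fun dc => pvG matrix n m r c dr dc)).sum := by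
    intro dr _
    rw [pv_sum_swap]
    congr 1
    apply List.map_congr_left
    intro dc _
    have hsplit : (fun p : Int × Int =>
        if (p.1 = r - dr ∧ p.2 = c - dc) ∧
           ¬(dr = 0 ∧ dc = 0) ∧ pvCell matrix (r - dr) (c - dc) = 1 then (1 : Nat) else 0)
        = fun p : Int × Int => if p.1 = r - dr ∧ p.2 = c - dc then
            (if ¬(dr = 0 ∧ dc = 0) ∧ pvCell matrix (r - dr) (c - dc) = 1 then 1 else 0) else 0 := by
      funext p
      rw [ite_and]
    rw [hsplit, pvG]
    exact pv_pairs_point _ _ (PySem.List.nodup_pyRange_one 0 n) (PySem.List.nodup_pyRange_one 0 m) _ _ _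
  rw [List.map_congr_left hswap2]
  -- expand the literal offset lists and finish by matching the eight terms with pvQ's
  have e1 : pvG matrix n m r c (-1) (-1) = pvT matrix n m (r + 1) (c + 1) := by
    simp only [pvG, sub_neg_eq_add, PySem.List.mem_pyRange_one, pvT]
    norm_num
    split_ifs <;> first | rfl | tauto
  have e2 : pvG matrix n m r c (-1) 0 = pvT matrix n m (r + 1) c := by
    simp only [pvG, sub_neg_eq_add, sub_zero, PySem.List.mem_pyRange_one, pvT]
    norm_num
    split_ifs <;> first | rfl | tauto
  have e3 : pvG matrix n m r c (-1) 1 = pvT matrix n m (r + 1) (c - 1) := by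
    simp only [pvG, sub_neg_eq_add, PySem.List.mem_pyRange_one, pvT]
    norm_num
    split_ifs <;> first | rfl | tauto
  have e4 : pvG matrix n m r c 0 (-1) = pvT matrix n m r (c + 1) := by
    simp only [pvG, sub_neg_eq_add, sub_zero, PySem.List.mem_pyRange_one, pvT]
    norm_num
    split_ifs <;> first | rfl | tauto
  have e5 : pvG matrix n m r c 0 0 = 0 := by
    simp only [pvG]
    norm_num
  have e6 : pvG matrix n m r c 0 1 = pvT matrix n m r (c - 1) := by
    simp only [pvG, sub_zero, PySem.List.mem_pyRange_one, pvT]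
    norm_num
    split_ifs <;> first | rfl | tauto
  have e7 : pvG matrix n m r c 1 (-1) = pvT matrix n m (r - 1) (c + 1) := by
    simp only [pvG, sub_neg_eq_add, PySem.List.mem_pyRange_one, pvT]
    norm_num
    split_ifs <;> first | rfl | tauto
  have e8 : pvG matrix n m r c 1 0 = pvT matrix n m (r - 1) c := by
    simp only [pvG, sub_zero, PySem.List.mem_pyRange_one, pvT]
    norm_num
    split_ifs <;> first | rfl | tauto
  have e9 : pvG matrix n m r c 1 1 = pvT matrix n m (r - 1) (c - 1) := by
    simp only [pvG, PySem.List.mem_pyRange_one, pvT]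
    norm_num
    split_ifs <;> first | rfl | tauto
  have hQ : pvQ matrix n m r c
      = ((pvT matrix n m (r - 1) (c - 1) + pvT matrix n m (r - 1) c + pvT matrix n m (r - 1) (c + 1)
      + pvT matrix n m r (c - 1) + pvT matrix n m r (c + 1)
      + pvT matrix n m (r + 1) (c - 1) + pvT matrix n m (r + 1) c
      + pvT matrix n m (r + 1) (c + 1) : Nat) : Int) := by
    have hrow : ∀ (q dr : Int), ¬ dr = 0 →
        pvRow matrix n m r c q dr
          = q + ((pvT matrix n m (r + dr) (c + -1) : Nat) : Int)
              + ((pvT matrix n m (r + dr) (c + 0) : Nat) : Int)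
              + ((pvT matrix n m (r + dr) (c + 1) : Nat) : Int) := by
      intro q dr h
      simp only [pvRow, List.foldl_cons, List.foldl_nil]
      norm_num [h, pvT, is_valid_cell]
      split_ifs <;> norm_num
    have hrow0 : ∀ q : Int,
        pvRow matrix n m r c q 0
          = q + ((pvT matrix n m (r + 0) (c + -1) : Nat) : Int)
              + ((pvT matrix n m (r + 0) (c + 1) : Nat) : Int) := by
      intro q
      simp only [pvRow, List.foldl_cons, List.foldl_nil]
      norm_num [pvT, is_valid_cell]
      split_ifs <;> norm_num
    have hQfold : pvQ matrix n m r c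
        = pvRow matrix n m r c (pvRow matrix n m r c (pvRow matrix n m r c 0 (-1)) 0) 1 := rfl
    rw [hQfold, hrow _ (-1) (by norm_num), hrow0, hrow _ 1 (by norm_num)]
    have c1 : ∀ a : Int, a + -1 = a - 1 := fun a => by ring
    simp only [c1, add_zero]
    push_cast
    ring
  rw [hQ, Nat.cast_inj]
  simp only [pvOffs, List.map_cons, List.map_nil, List.sum_cons, List.sum_nil]
  rw [e1, e2, e3, e4, e5, e6, e7, e8, e9]
  ring

-- per-cell step of A's selection loop (with the gathered count named)
def pvStepA (matrix : List (List Int)) (n m : Int) (s : Int × Int × Int) (p : Int × Int) :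
    Int × Int × Int :=
  if p.1 = 0 ∧ p.2 = 0 then s
  else if pvCell matrix p.1 p.2 = 1 then
    if pvQ matrix n m p.1 p.2 > s.1 then (pvQ matrix n m p.1 p.2, p.1 + 1, p.2 + 1) else s
  else s

-- per-cell step of B's selection loop, with the table lookup replaced by the gathered count
def pvStepB (matrix : List (List Int)) (n m : Int) (s : String × Int) (p : Int × Int) :
    String × Int :=
  if ¬(p.1 = 0 ∧ p.2 = 0) ∧ pvCell matrix p.1 p.2 = 1 then
    if pvQ matrix n m p.1 p.2 > s.2 then
      (pvFmt (p.1 + 1) (p.2 + 1) (pvQ matrix n m p.1 p.2), pvQ matrix n m p.1 p.2)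
    else s
  else s

theorem pv_sim (matrix : List (List Int)) (n m : Int) (cs : List (Int × Int))
    (h : ∀ p ∈ cs, 0 ≤ p.1 ∧ 0 ≤ p.2) (a : Int × Int × Int) :
    cs.foldl (pvStepB matrix n m) (pvRender a) = pvRender (cs.foldl (pvStepA matrix n m) a) := by
  induction cs generalizing a with
  | nil => rfl
  | cons p t ih =>
    have hp := h p (List.mem_cons_self ..)
    have hstep : pvStepB matrix n m (pvRender a) p = pvRender (pvStepA matrix n m a p) := by
      by_cases h0 : p.1 = 0 ∧ p.2 = 0
      · simp [pvStepA, pvStepB, h0]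
      · by_cases hv : pvCell matrix p.1 p.2 = 1
        · simp only [pvStepA, pvStepB, if_neg h0, if_pos hv,
            if_pos (⟨h0, hv⟩ : ¬(p.1 = 0 ∧ p.2 = 0) ∧ pvCell matrix p.1 p.2 = 1)]
          have h2 : (pvRender a).2 = a.1 := rfl
          rw [h2]
          by_cases hq : pvQ matrix n m p.1 p.2 > a.1
          · rw [if_pos hq, if_pos hq]
            show _ = pvRender _
            simp only [pvRender]
            rw [if_pos ⟨by omega, by omega⟩]
          · rw [if_neg hq, if_neg hq]
        · simp [pvStepA, pvStepB, h0, hv]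
    rw [List.foldl_cons, List.foldl_cons, hstep, ih (fun q hq => h q (List.mem_cons_of_mem _ hq))]

theorem pv_main (matrix : List (List Int)) (n m : Int) :
    find_bride matrix n m = find_bride_alt matrix n m := by
  have hbounds : ∀ p ∈ pvPairs (PySem.List.pyRange 0 n 1) (PySem.List.pyRange 0 m 1),
      (0 ≤ p.1 ∧ p.1 < n) ∧ 0 ≤ p.2 ∧ p.2 < m := by
    intro p hp
    simp only [pvPairs, List.mem_flatMap, List.mem_map] at hp
    obtain ⟨a, ha, b, hb, rfl⟩ := hp
    rw [PySem.List.mem_pyRange_one] at ha hb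
    exact ⟨⟨ha.1, ha.2⟩, hb.1, hb.2⟩
  have hempty : ∀ k : Int × Int, (PySem.Dict.empty : PySem.Dict (Int × Int) Int).getD k 0 = 0 :=
    fun k => by simp [pysem]
  simp only [find_bride, find_bride_alt]
  rw [pv_foldl_pair, pv_foldl_pair]
  rw [PySem.List.foldl_congr_mem _ _ (pvStepB matrix n m) _ (fun acc p hp => by
    have hb := hbounds p hp
    rw [pv_counts_eq matrix n m, PySem.Dict.getD_foldl_insert_add_one, hempty, zero_add,
      pv_count_eq_Q matrix n m p.1 p.2 ⟨hb.1.1, hb.1.2⟩ ⟨hb.2.1, hb.2.2⟩]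
    rfl)]
  have hinit : ("No suitable girl found", (0 : Int)) = pvRender (0, -1, -1) := by
    norm_num [pvRender]
  rw [hinit, pv_sim matrix n m _ (fun p hp => ⟨(hbounds p hp).1.1, (hbounds p hp).2.1⟩)]
  rfl

-- ===== VERDICT (by name: the statement is the Claim_ definition above) =====
theorem find_bride_spec : Claim_equal_find_bride := by
  intro matrix n m _ _
  show _ = _
  exact pv_main matrix n m
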